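-- pv_equiv track=rewrite | github.com/rmcgibbo/reftagger | bibtagger/chunker.py | greedy_label
-- ===== SOURCE A (Python) =====
-- def greedy_label(text, chunks):
--     """Find non-overlapping chunks in text.
--
--     Parameters
--     ----------
--     text : str
--     chunks : list of str
--
--     Returns
--     -------
--     matches : list of 2-tuples
--         Each element in the returned list is a length-2 tuple `(i, j)` s.t.
--         `i` is the index of the matching chunk and `j` is the index in
--         `text` where the substring match begins.
--
--     Example
--     -------
--     >>> text = 'hello hello; world'
--     >>> greedy_label(text, ['hello', 'world'])
--     [(0, 0), (0, 6), (1, 13)]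
--
--     # the semantics of the return value is that chunk[0] matches begining
--     # at text[0], then chunk[0] matches again at beggining text[6], and then
--     # chunk[1] matches beginning at text[13].
--     """
--     stack = []
--
--     p = 0
--     while True:
--         gap = {}
--         matchlength = {}
--
--         # for label, ch in chunks.items():
--         for label, ch in enumerate(chunks):
--             if len(ch) > 0:
--                 i = text.find(ch, p)
--                 if i > -1:
--                     gap[label] = i-p
--                     matchlength[label] = len(ch)
--
--         if len(gap) == 0:
--             # we're at the end of the text, with no more
--             # matching chunks in text[p:]
--             break
--
--         # sort the chunks that match text[p:]. we want to pick the one that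
--         # introduces the smallest gap. if two chunks both introduce the
--         # same gap, then we take the one that's longest.
--         label = min(gap.keys(), key=lambda k: (gap[k], -matchlength[k]))
--         stack.append((label, p+gap[label]))
--         p += gap[label] + matchlength[label]
--
--     return stack
-- ===== SOURCE B (Python) =====
-- def greedy_label(text, chunks):
--     """Single left-to-right scan: at each position take the longest chunk
--     that matches there (first such chunk on a length tie), then jump past it."""
--     n = len(text)
--     out = []
--     pos = 0
--     while pos < n:
--         best = None  # (label, length) of longest chunk matching at pos
--         for label, ch in enumerate(chunks):
--             if ch and text.startswith(ch, pos) and (best is None or len(ch) > best[1]):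
--                 best = (label, len(ch))
--         if best is None:
--             pos += 1
--         else:
--             out.append((best[0], pos))
--             pos += best[1]
--     return out
-- ===== Notes on version B (the rewrite author's own statement) =====
-- stated objective: faster
-- what changed: B replaces A's per-match rounds of str.find scans over all chunks (gap/length dicts plus a keyed min per match) by a single left-to-right scan of the text that at each position takes the longest chunk starting there (first on ties) and jumps past it, so the text is never rescanned per match.
import Mathlib
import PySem

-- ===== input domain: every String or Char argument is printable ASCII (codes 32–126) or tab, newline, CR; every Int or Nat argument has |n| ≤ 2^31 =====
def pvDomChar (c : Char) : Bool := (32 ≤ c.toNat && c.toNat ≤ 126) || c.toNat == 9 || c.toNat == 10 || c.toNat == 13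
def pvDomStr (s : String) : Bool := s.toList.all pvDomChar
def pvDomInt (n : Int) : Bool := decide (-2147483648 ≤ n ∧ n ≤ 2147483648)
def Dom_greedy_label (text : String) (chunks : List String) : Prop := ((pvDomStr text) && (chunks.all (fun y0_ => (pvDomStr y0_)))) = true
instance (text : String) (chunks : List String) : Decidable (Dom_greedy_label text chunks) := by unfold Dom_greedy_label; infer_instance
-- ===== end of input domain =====

-- B replaces A's per-match rounds of str.find scans over all chunks (gap/length dicts + keyed min) by a single
-- left-to-right scan taking, at each position, the longest chunk starting there — the text is never rescanned per match.

-- ===== PORT A =====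
-- one iteration's dict-building loop: for label, ch in enumerate(chunks): if len(ch)>0: i = text.find(ch, p); if i > -1: gap[label]=i-p; matchlength[label]=len(ch)
def greedyStep (tl : List Char) (p : Int) (gm : PySem.Dict Int Int × PySem.Dict Int Int) (lc : Int × List Char) : PySem.Dict Int Int × PySem.Dict Int Int :=
  if 0 < lc.2.length then
    let i := PySem.Chars.findFrom tl lc.2 p none
    if -1 < i then (gm.1.insert lc.1 (i - p), gm.2.insert lc.1 (lc.2.length : Int)) else gm
  else gm

def greedyDicts (tl : List Char) (ecs : List (Int × List Char)) (p : Int) : PySem.Dict Int Int × PySem.Dict Int Int :=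
  ecs.foldl (greedyStep tl p) (PySem.Dict.empty, PySem.Dict.empty)

-- the 'while True' loop; fuel (length text + 1) is an upper bound on the number of iterations (p strictly increases, stays ≤ len)
def greedyLoop (tl : List Char) (ecs : List (Int × List Char)) : Nat → Int → List (Int × Int) → List (Int × Int)
  | 0, _, stack => stack
  | fuel+1, p, stack =>
    let gm := greedyDicts tl ecs p
    if gm.1.size = 0 then stack
    else
      match PySem.List.min2? gm.1.keys (fun k => gm.1.getD k 0) (fun k => -(gm.2.getD k 0)) with
      | none => stack   -- unreachable: gap is nonempty
      | some label =>
          greedyLoop tl ecs fuel (p + gm.1.getD label 0 + gm.2.getD label 0)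
            (stack ++ [(label, p + gm.1.getD label 0)])

def greedy_label (text : String) (chunks : List String) : List (Int × Int) :=
  greedyLoop text.toList (PySem.List.enumerate (chunks.map String.toList)) (text.toList.length + 1) 0 []

-- ===== PORT B =====
-- inner for-loop of B: longest chunk starting at pos (first on a length tie); text.startswith(ch, pos) is exact as a prefix test on (drop pos) for 0 ≤ pos
def bStep (tl : List Char) (pos : Nat) (best : Option (Int × Nat)) (lc : Int × List Char) : Option (Int × Nat) :=
  if (decide (0 < lc.2.length) && PySem.Chars.startswith (tl.drop pos) lc.2 &&
      (match best with | none => true | some b => decide (b.2 < lc.2.length))) = true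
  then some (lc.1, lc.2.length) else best

def bSel (tl : List Char) (ecs : List (Int × List Char)) (pos : Nat) : Option (Int × Nat) :=
  ecs.foldl (bStep tl pos) none

-- the 'while pos < n' loop; pos strictly increases each iteration, so fuel (length text + 1) suffices
def bLoop (tl : List Char) (ecs : List (Int × List Char)) : Nat → Nat → List (Int × Int) → List (Int × Int)
  | 0, _, out => out
  | fuel+1, pos, out =>
    if pos < tl.length then
      match bSel tl ecs pos with
      | none => bLoop tl ecs fuel (pos + 1) out
      | some r => bLoop tl ecs fuel (pos + r.2) (out ++ [(r.1, (pos : Int))])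
    else out

def greedy_label_alt (text : String) (chunks : List String) : List (Int × Int) :=
  bLoop text.toList (PySem.List.enumerate (chunks.map String.toList)) (text.toList.length + 1) 0 []

-- ===== PRECONDITION & SPEC =====
def Spec_greedy_label (text : String) (chunks : List String) (out : List (Int × Int)) : Prop := out = greedy_label_alt text chunks
instance (text : String) (chunks : List String) (out : List (Int × Int)) : Decidable (Spec_greedy_label text chunks out) := by unfold Spec_greedy_label; infer_instance

-- ===== CLAIM (what is proved, stated in full; the proofs are below) =====
def Claim_equal_greedy_label : Prop := ∀ (text : String) (chunks : List String), Dom_greedy_label text chunks → Spec_greedy_label text chunks (greedy_label text chunks)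

-- ===== LEMMAS AND PROOFS =====

def candP (tl : List Char) (p : Int) (lc : Int × List Char) : Bool :=
  decide (0 < lc.2.length) && decide (-1 < PySem.Chars.findFrom tl lc.2 p none)

def gapV (tl : List Char) (p : Int) (lc : Int × List Char) : Int :=
  PySem.Chars.findFrom tl lc.2 p none - p

theorem mk_items (d : PySem.Dict Int Int) : PySem.Dict.mk d.items = d := rfl

theorem dicts_items (tl : List Char) (p : Int) :
    ∀ (ecs : List (Int × List Char)) (g m : PySem.Dict Int Int),
      (ecs.map Prod.fst).Nodup →
      (∀ lc ∈ ecs, g.contains lc.1 = false ∧ m.contains lc.1 = false) →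
      ecs.foldl (greedyStep tl p) (g, m) =
        (PySem.Dict.mk (g.items ++ (ecs.filter (candP tl p)).map (fun lc => (lc.1, gapV tl p lc))),
         PySem.Dict.mk (m.items ++ (ecs.filter (candP tl p)).map (fun lc => (lc.1, (lc.2.length : Int))))) := by
  intro ecs
  induction ecs with
  | nil => intro g m _ _; simp [mk_items]
  | cons a t ih =>
    intro g m hnd hfresh
    have hnd0 : (a.1 :: t.map Prod.fst).Nodup := by simpa using hnd
    have hnd' : (t.map Prod.fst).Nodup := hnd0.of_cons
    have hane : ∀ lc ∈ t, lc.1 ≠ a.1 := by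
      intro lc hlc h
      exact (List.nodup_cons.mp hnd0).1 (h ▸ List.mem_map_of_mem hlc)
    by_cases h1 : 0 < a.2.length
    · by_cases h2 : -1 < PySem.Chars.findFrom tl a.2 p none
      · have hstep : greedyStep tl p (g, m) a =
            (g.insert a.1 (PySem.Chars.findFrom tl a.2 p none - p), m.insert a.1 (a.2.length : Int)) := by
          simp [greedyStep, h1, h2]
        have hga : g.contains a.1 = false := (hfresh a (by simp)).1
        have hma : m.contains a.1 = false := (hfresh a (by simp)).2
        have hfresh' : ∀ lc ∈ t,
            (g.insert a.1 (PySem.Chars.findFrom tl a.2 p none - p)).contains lc.1 = false ∧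
            (m.insert a.1 (a.2.length : Int)).contains lc.1 = false := by
          intro lc hlc
          have h3 := hfresh lc (by simp [hlc])
          constructor <;>
            simp [PySem.Dict.contains_insert, h3.1, h3.2, hane lc hlc]
        have hc : candP tl p a = true := by simp [candP, h1, h2]
        rw [List.foldl_cons, hstep, ih _ _ hnd' hfresh']
        rw [PySem.Dict.items_insert_of_not_contains _ _ hga,
            PySem.Dict.items_insert_of_not_contains _ _ hma]
        simp [hc, gapV]
      · have hstep : greedyStep tl p (g, m) a = (g, m) := by simp [greedyStep, h1, h2]
        have hc : candP tl p a = false := by simp [candP, h1, h2]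
        rw [List.foldl_cons, hstep, ih _ _ hnd' (fun lc hlc => hfresh lc (by simp [hlc]))]
        simp [hc]
    · have hstep : greedyStep tl p (g, m) a = (g, m) := by simp [greedyStep, h1]
      have hc : candP tl p a = false := by simp [candP, h1]
      rw [List.foldl_cons, hstep, ih _ _ hnd' (fun lc hlc => hfresh lc (by simp [hlc]))]
      simp [hc]


def lexLt {α : Type} (k1 k2 : α → Int) (x y : α) : Prop :=
  k1 x < k1 y ∨ (k1 x = k1 y ∧ k2 x < k2 y)

def m2step {α : Type} (k1 k2 : α → Int) (acc : Option α) (x : α) : Option α :=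
  match acc with
  | none => some x
  | some m => if (decide (k1 x < k1 m) || !decide (k1 m < k1 x) && decide (k2 x < k2 m)) = true then some x else some m

theorem min2_eq_foldl {α : Type} (k1 k2 : α → Int) (l : List α) :
    PySem.List.min2? l k1 k2 = l.foldl (m2step k1 k2) none := rfl

theorem m2cond_iff {α : Type} (k1 k2 : α → Int) (x m : α) :
    ((decide (k1 x < k1 m) || !decide (k1 m < k1 x) && decide (k2 x < k2 m)) = true) ↔ lexLt k1 k2 x m := by
  simp [lexLt]; omega

theorem lex_trans {α : Type} {k1 k2 : α → Int} {r x a : α} :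
    lexLt k1 k2 r x → lexLt k1 k2 x a → lexLt k1 k2 r a := by
  unfold lexLt; omega

theorem lex_switch {α : Type} {k1 k2 : α → Int} {x a r : α} :
    ¬ lexLt k1 k2 x a → lexLt k1 k2 r a → lexLt k1 k2 r x := by
  unfold lexLt; omega

theorem m2aux {α : Type} (k1 k2 : α → Int) :
    ∀ (t : List α) (a : α), ∃ r, t.foldl (m2step k1 k2) (some a) = some r ∧
      ((r = a ∧ ∀ y ∈ t, ¬ lexLt k1 k2 y r) ∨
       (∃ pre suf, t = pre ++ r :: suf ∧ lexLt k1 k2 r a ∧ (∀ y ∈ pre, lexLt k1 k2 r y) ∧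
         (∀ y ∈ suf, ¬ lexLt k1 k2 y r))) := by
  intro t
  induction t with
  | nil => intro a; exact ⟨a, rfl, Or.inl ⟨rfl, by simp⟩⟩
  | cons x t' ih =>
    intro a
    by_cases hx : lexLt k1 k2 x a
    · have hstep : m2step k1 k2 (some a) x = some x := by
        simp only [m2step]; rw [if_pos ((m2cond_iff k1 k2 x a).mpr hx)]
      obtain ⟨r, hr, hcase⟩ := ih x
      refine ⟨r, by rw [List.foldl_cons, hstep, hr], ?_⟩
      rcases hcase with ⟨rfl, hall⟩ | ⟨pre, suf, hsplit, hra, hpre, hsuf⟩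
      · exact Or.inr ⟨[], t', by simp, hx, by simp, hall⟩
      · exact Or.inr ⟨x :: pre, suf, by simp [hsplit], lex_trans hra hx,
          by intro y hy; rcases List.mem_cons.mp hy with rfl | hy'; exact hra; exact hpre y hy', hsuf⟩
    · have hstep : m2step k1 k2 (some a) x = some a := by
        simp only [m2step]; rw [if_neg (fun h => hx ((m2cond_iff k1 k2 x a).mp h))]
      obtain ⟨r, hr, hcase⟩ := ih a
      refine ⟨r, by rw [List.foldl_cons, hstep, hr], ?_⟩
      rcases hcase with ⟨rfl, hall⟩ | ⟨pre, suf, hsplit, hra, hpre, hsuf⟩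
      · refine Or.inl ⟨rfl, ?_⟩
        intro y hy; rcases List.mem_cons.mp hy with rfl | hy'; exact hx; exact hall y hy'
      · exact Or.inr ⟨x :: pre, suf, by simp [hsplit], hra,
          by intro y hy; rcases List.mem_cons.mp hy with rfl | hy'; exact lex_switch hx hra; exact hpre y hy', hsuf⟩


theorem min2_spec {α : Type} (k1 k2 : α → Int) :
    ∀ (l : List α), l ≠ [] →
      ∃ r pre suf, PySem.List.min2? l k1 k2 = some r ∧ l = pre ++ r :: suf ∧
        (∀ y ∈ pre, lexLt k1 k2 r y) ∧ (∀ y ∈ suf, ¬ lexLt k1 k2 y r) := by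
  intro l hl
  match l with
  | x :: t =>
    obtain ⟨r, hr, hcase⟩ := m2aux k1 k2 t x
    have heq : PySem.List.min2? (x :: t) k1 k2 = some r := by
      rw [min2_eq_foldl, List.foldl_cons]; exact hr
    rcases hcase with ⟨rfl, hall⟩ | ⟨pre, suf, hsplit, hra, hpre, hsuf⟩
    · exact ⟨r, [], t, heq, by simp, by simp, hall⟩
    · refine ⟨r, x :: pre, suf, heq, by simp [hsplit], ?_, hsuf⟩
      intro y hy; rcases List.mem_cons.mp hy with rfl | hy'; exact hra; exact hpre y hy'


def matchB (tl : List Char) (pos : Nat) (lc : Int × List Char) : Prop :=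
  0 < lc.2.length ∧ lc.2 <+: tl.drop pos

theorem bStep_of_not_match {tl : List Char} {pos : Nat} {lc : Int × List Char}
    (h : ¬ matchB tl pos lc) (best : Option (Int × Nat)) : bStep tl pos best lc = best := by
  unfold bStep
  by_cases h1 : 0 < lc.2.length
  · have h2 : PySem.Chars.startswith (tl.drop pos) lc.2 = false := by
      rcases Bool.eq_false_or_eq_true (PySem.Chars.startswith (tl.drop pos) lc.2) with h2 | h2
      all_goals first
        | exact h2
        | exact absurd ⟨h1, (PySem.Chars.startswith_iff _ _).mp h2⟩ h
    simp [h2]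
  · simp [h1]

theorem bStep_of_match {tl : List Char} {pos : Nat} {lc : Int × List Char}
    (h : matchB tl pos lc) (best : Option (Int × Nat)) (hb : ∀ b ∈ best, b.2 < lc.2.length) :
    bStep tl pos best lc = some (lc.1, lc.2.length) := by
  cases best with
  | none => unfold bStep; simp [h.1, (PySem.Chars.startswith_iff _ _).mpr h.2]
  | some b => unfold bStep; simp [h.1, (PySem.Chars.startswith_iff _ _).mpr h.2, hb b rfl]

theorem bStep_cases {tl : List Char} {pos : Nat} (acc : Option (Int × Nat)) (lc : Int × List Char) :
    bStep tl pos acc lc = acc ∨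
    (bStep tl pos acc lc = some (lc.1, lc.2.length) ∧ matchB tl pos lc ∧ ∀ b ∈ acc, b.2 < lc.2.length) := by
  cases acc with
  | none =>
    unfold bStep
    by_cases hc : (decide (0 < lc.2.length) && PySem.Chars.startswith (tl.drop pos) lc.2 && true) = true
    · rw [if_pos hc]
      simp only [Bool.and_true, Bool.and_eq_true, decide_eq_true_eq] at hc
      exact Or.inr ⟨rfl, ⟨hc.1, (PySem.Chars.startswith_iff _ _).mp hc.2⟩, by simp⟩
    · rw [if_neg hc]
      exact Or.inl rfl
  | some b =>
    unfold bStep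
    by_cases hc : (decide (0 < lc.2.length) && PySem.Chars.startswith (tl.drop pos) lc.2 &&
        decide (b.2 < lc.2.length)) = true
    · rw [if_pos hc]
      simp only [Bool.and_eq_true, decide_eq_true_eq] at hc
      refine Or.inr ⟨rfl, ⟨hc.1.1, (PySem.Chars.startswith_iff _ _).mp hc.1.2⟩, ?_⟩
      intro b' hb'
      simp only [Option.mem_def, Option.some.injEq] at hb'
      exact hb' ▸ hc.2
    · rw [if_neg hc]
      exact Or.inl rfl

theorem bfold_skip {tl : List Char} {pos : Nat} :
    ∀ (l : List (Int × List Char)) (acc : Option (Int × Nat)),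
      (∀ lc ∈ l, ¬ matchB tl pos lc) → l.foldl (bStep tl pos) acc = acc := by
  intro l
  induction l with
  | nil => intro acc _; rfl
  | cons a t ih =>
    intro acc h
    rw [List.foldl_cons, bStep_of_not_match (h a (by simp)) acc]
    exact ih acc (fun lc hlc => h lc (by simp [hlc]))

theorem bfold_some {tl : List Char} {pos : Nat} :
    ∀ (l : List (Int × List Char)) (acc : Option (Int × Nat)) (r : Int × Nat),
      l.foldl (bStep tl pos) acc = some r →
      acc = some r ∨ ∃ lc ∈ l, r = (lc.1, lc.2.length) ∧ matchB tl pos lc := by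
  intro l
  induction l with
  | nil => intro acc r h; exact Or.inl h
  | cons a t ih =>
    intro acc r h
    rw [List.foldl_cons] at h
    rcases ih _ r h with heq | ⟨lc, hlc, hr⟩
    · rcases bStep_cases acc a with hcase | ⟨hcase, hm, _⟩
      · rw [hcase] at heq
        exact Or.inl heq
      · rw [hcase] at heq
        exact Or.inr ⟨a, by simp, (Option.some.inj heq).symm, hm⟩
    · exact Or.inr ⟨lc, by simp [hlc], hr⟩

theorem bfold_bound {tl : List Char} {pos : Nat} {L : Nat} :
    ∀ (l : List (Int × List Char)) (acc : Option (Int × Nat)),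
      (∀ lc ∈ l, matchB tl pos lc → lc.2.length < L) →
      (∀ b ∈ acc, b.2 < L) →
      ∀ b ∈ l.foldl (bStep tl pos) acc, b.2 < L := by
  intro l
  induction l with
  | nil => intro acc _ hacc; exact hacc
  | cons a t ih =>
    intro acc h hacc
    rw [List.foldl_cons]
    refine ih _ (fun lc hlc => h lc (by simp [hlc])) ?_
    rcases bStep_cases acc a with hcase | ⟨hcase, hm, _⟩
    · rw [hcase]; exact hacc
    · rw [hcase]
      intro b hb
      simp only [Option.mem_def, Option.some.injEq] at hb
      rw [← hb]
      exact h a (by simp) hm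
  
theorem bfold_keep {tl : List Char} {pos : Nat} {L : Nat} {x : Int} :
    ∀ (l : List (Int × List Char)),
      (∀ lc ∈ l, matchB tl pos lc → lc.2.length ≤ L) →
      l.foldl (bStep tl pos) (some (x, L)) = some (x, L) := by
  intro l
  induction l with
  | nil => intro _; rfl
  | cons a t ih =>
    intro h
    rw [List.foldl_cons]
    rcases bStep_cases (tl := tl) (pos := pos) (some (x, L)) a with hcase | ⟨_, hm, hlt⟩
    · rw [hcase]
      exact ih (fun lc hlc => h lc (by simp [hlc]))
    · have h1 := h a (by simp) hm
      have h2 := hlt (x, L) rfl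
      simp at h2
      omega

-- an occurrence at j ≥ q of a chunk is an occurrence inside text[q:]
theorem occ_infix {tl sub : List Char} {q j : Nat} (hqj : q ≤ j) (h : sub <+: tl.drop j) :
    sub <:+: tl.drop q := by
  have hd : tl.drop j = (tl.drop q).drop (j - q) := by
    rw [List.drop_drop]; congr 1; omega
  rw [hd] at h
  exact h.isInfix.trans (List.drop_suffix _ _).isInfix

theorem cand_of_match {tl : List Char} {q j : Nat} {lc : Int × List Char}
    (hq : q ≤ tl.length) (hqj : q ≤ j) (hlen : 0 < lc.2.length) (h : lc.2 <+: tl.drop j) :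
    candP tl (q : Int) lc = true := by
  have hne : PySem.Chars.findFrom tl lc.2 (q : Int) none ≠ -1 := by
    rw [Ne, PySem.Chars.findFrom_natCast_eq_neg_one_iff tl lc.2 q hq]
    simp only [not_not]
    exact occ_infix hqj h
  have hsp := PySem.Chars.findFrom_natCast_spec tl lc.2 q hq hne
  have : (0 : Int) ≤ (q : Int) := by positivity
  simp [candP, hlen]
  omega

theorem find_le_of_match {tl : List Char} {q j : Nat} {lc : Int × List Char}
    (hq : q ≤ tl.length) (hqj : q ≤ j) (hlen : 0 < lc.2.length) (h : lc.2 <+: tl.drop j) :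
    (PySem.Chars.findFrom tl lc.2 (q : Int) none).toNat ≤ j := by
  have hc := cand_of_match hq hqj hlen h
  have hne : PySem.Chars.findFrom tl lc.2 (q : Int) none ≠ -1 := by
    simp [candP] at hc; omega
  have hsp := PySem.Chars.findFrom_natCast_spec tl lc.2 q hq hne
  by_contra hlt
  exact hsp.2.2 j hqj (by omega) h

theorem unique_split {α : Type} :
    ∀ (p1 p2 s1 s2 : List α) (x : α), p1 ++ x :: s1 = p2 ++ x :: s2 → x ∉ p1 → x ∉ p2 →
      p1 = p2 ∧ s1 = s2 := by
  intro p1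
  induction p1 with
  | nil =>
    intro p2 s1 s2 x h hx1 hx2
    cases p2 with
    | nil => simpa using h
    | cons b t =>
      simp only [List.nil_append, List.cons_append, List.cons.injEq] at h
      exact absurd (h.1 ▸ List.mem_cons_self) hx2
  | cons a t ih =>
    intro p2 s1 s2 x h hx1 hx2
    cases p2 with
    | nil =>
      simp only [List.nil_append, List.cons_append, List.cons.injEq] at h
      exact absurd (h.1 ▸ List.mem_cons_self) hx1
    | cons b t2 =>
      simp only [List.cons_append, List.cons.injEq] at h
      obtain ⟨rfl, h2⟩ := h
      have := ih t2 s1 s2 x h2 (fun hm => hx1 (List.mem_cons_of_mem _ hm)) (fun hm => hx2 (List.mem_cons_of_mem _ hm))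
      exact ⟨by rw [this.1], this.2⟩

theorem astep (tl : List Char) (ecs : List (Int × List Char))
    (hnd : (ecs.map Prod.fst).Nodup) (q : Nat) (hq : q ≤ tl.length) :
    ((greedyDicts tl ecs (q : Int)).1.size = 0 ∧ (∀ pos, q ≤ pos → bSel tl ecs pos = none))
    ∨ (∃ (ℓ : Int) (i L : Nat), (greedyDicts tl ecs (q : Int)).1.size ≠ 0 ∧
        PySem.List.min2? (greedyDicts tl ecs (q : Int)).1.keys
          (fun k => (greedyDicts tl ecs (q : Int)).1.getD k 0)
          (fun k => -((greedyDicts tl ecs (q : Int)).2.getD k 0)) = some ℓ ∧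
        (greedyDicts tl ecs (q : Int)).1.getD ℓ 0 = (i : Int) - (q : Int) ∧
        (greedyDicts tl ecs (q : Int)).2.getD ℓ 0 = (L : Int) ∧
        q ≤ i ∧ 0 < L ∧ i + L ≤ tl.length ∧
        (∀ j, q ≤ j → j < i → bSel tl ecs j = none) ∧
        bSel tl ecs i = some (ℓ, L)) := by
  have hdict : greedyDicts tl ecs (q : Int) =
      (PySem.Dict.mk (((ecs.filter (candP tl (q:Int))).map (fun lc => (lc.1, gapV tl (q:Int) lc)))),
       PySem.Dict.mk (((ecs.filter (candP tl (q:Int))).map (fun lc => (lc.1, (lc.2.length : Int)))))) := by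
    unfold greedyDicts
    rw [dicts_items tl (q : Int) ecs PySem.Dict.empty PySem.Dict.empty hnd
      (fun lc _ => ⟨PySem.Dict.contains_empty _, PySem.Dict.contains_empty _⟩)]
    rfl
  set cand := ecs.filter (candP tl (q : Int)) with hcanddef
  have hcandF : ∀ lc ∈ cand, 0 < lc.2.length ∧
      (q : Int) ≤ PySem.Chars.findFrom tl lc.2 (q : Int) none ∧
      lc.2 <+: tl.drop (PySem.Chars.findFrom tl lc.2 (q : Int) none).toNat ∧
      (PySem.Chars.findFrom tl lc.2 (q : Int) none).toNat + lc.2.length ≤ tl.length := by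
    intro lc hlc
    have hc : candP tl (q : Int) lc = true := List.of_mem_filter hlc
    simp only [candP, Bool.and_eq_true, decide_eq_true_eq] at hc
    have hne : PySem.Chars.findFrom tl lc.2 (q : Int) none ≠ -1 := by omega
    have hsp := PySem.Chars.findFrom_natCast_spec tl lc.2 q hq hne
    refine ⟨hc.1, hsp.1, hsp.2.1, ?_⟩
    have hl1 := hsp.2.1.length_le
    have hl2 : (tl.drop (PySem.Chars.findFrom tl lc.2 (q : Int) none).toNat).length =
        tl.length - (PySem.Chars.findFrom tl lc.2 (q : Int) none).toNat := List.length_drop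
    omega
  by_cases hemp : cand = []
  · left
    constructor
    · rw [hdict]; simp [PySem.Dict.size, hemp]
    · intro pos hpos
      apply bfold_skip
      intro lc hlc hm
      have hc := cand_of_match hq hpos hm.1 hm.2
      have : lc ∈ cand := List.mem_filter.mpr ⟨hlc, hc⟩
      rw [hemp] at this; exact absurd this (List.not_mem_nil)
  · right
    have hkeys : (greedyDicts tl ecs (q:Int)).1.keys = cand.map Prod.fst := by
      rw [hdict]; simp [PySem.Dict.keys]
    have hmkeys : (greedyDicts tl ecs (q:Int)).2.keys = cand.map Prod.fst := by
      rw [hdict]; simp [PySem.Dict.keys]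
    have hndc : (cand.map Prod.fst).Nodup := hnd.sublist (List.filter_sublist.map _)
    have hgetg : ∀ y ∈ cand, (greedyDicts tl ecs (q:Int)).1.getD y.1 0 = gapV tl (q:Int) y := by
      intro y hy
      apply PySem.Dict.getD_of_mem_items
      · rw [hdict]
        exact List.mem_map_of_mem hy
      · rw [hkeys]; exact hndc
    have hgetm : ∀ y ∈ cand, (greedyDicts tl ecs (q:Int)).2.getD y.1 0 = (y.2.length : Int) := by
      intro y hy
      apply PySem.Dict.getD_of_mem_items
      · rw [hdict]
        exact List.mem_map_of_mem hy
      · rw [hmkeys]; exact hndc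
    obtain ⟨ℓ, preK, sufK, hmin, hsplitK, hpreK, hsufK⟩ :=
      min2_spec (fun k => (greedyDicts tl ecs (q:Int)).1.getD k 0)
        (fun k => -((greedyDicts tl ecs (q:Int)).2.getD k 0))
        ((greedyDicts tl ecs (q:Int)).1.keys)
        (by rw [hkeys]; simp [hemp])
    rw [hkeys] at hsplitK
    obtain ⟨pre, rest, hc1, hpreMap, hrestMap⟩ := List.map_eq_append_iff.mp hsplitK
    obtain ⟨lcs, suf, hrest, hfst, hsufMap⟩ := List.map_eq_cons_iff.mp hrestMap
    subst hrest
    have hlcs_cand : lcs ∈ cand := by rw [hc1]; exact List.mem_append_right _ List.mem_cons_self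
    obtain ⟨hlenpos, hfind_ge, hprefix, hbound⟩ := hcandF lcs hlcs_cand
    have hq0 : (0:Int) ≤ (q:Int) := by positivity
    set fI := PySem.Chars.findFrom tl lcs.2 (q : Int) none with hfIdef
    have hicast : ((fI.toNat : Nat) : Int) = fI := Int.toNat_of_nonneg (by omega)
    refine ⟨ℓ, fI.toNat, lcs.2.length, ?_, hmin, ?_, ?_, ?_, ?_, ?_, ?_, ?_⟩
    · rw [hdict]; simp [PySem.Dict.size, hemp]
    · rw [← hfst, hgetg lcs hlcs_cand]
      unfold gapV; rw [hicast]
    · rw [← hfst, hgetm lcs hlcs_cand]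
    · omega
    · omega
    · omega
    · -- positions before fI.toNat have no match
      intro j hqj hji
      apply bfold_skip
      intro lc hlc hm
      have hc := cand_of_match hq hqj hm.1 hm.2
      have hlc_cand : lc ∈ cand := List.mem_filter.mpr ⟨hlc, hc⟩
      have hminf : gapV tl (q:Int) lcs ≤ gapV tl (q:Int) lc := by
        rw [hc1] at hlc_cand
        rcases List.mem_append.mp hlc_cand with hp | hs
        · have hyK : lc.1 ∈ preK := by rw [← hpreMap]; exact List.mem_map_of_mem hp
          have := hpreK lc.1 hyK
          simp only [lexLt] at this
          rw [← hfst, hgetg lcs hlcs_cand, hgetg lc (by rw [hc1]; exact List.mem_append_left _ hp),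
            hgetm lcs hlcs_cand, hgetm lc (by rw [hc1]; exact List.mem_append_left _ hp)] at this
          omega
        · rcases List.mem_cons.mp hs with rfl | hs'
          · omega
          · have hyK : lc.1 ∈ sufK := by rw [← hsufMap]; exact List.mem_map_of_mem hs'
            have := hsufK lc.1 hyK
            simp only [lexLt] at this
            have hmem : lc ∈ cand := by
              rw [hc1]; exact List.mem_append_right _ (List.mem_cons_of_mem _ hs')
            rw [← hfst, hgetg lcs hlcs_cand, hgetg lc hmem,
              hgetm lcs hlcs_cand, hgetm lc hmem] at this
            omega
      have hle := find_le_of_match hq hqj hm.1 hm.2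
      have hge := (hcandF lc hlc_cand).2.1
      unfold gapV at hminf
      omega
  -- bSel at fI.toNat picks exactly (ℓ, lcs.2.length)
    · have hmatch_mem : ∀ y ∈ ecs, matchB tl fI.toNat y →
          y ∈ cand ∧ PySem.Chars.findFrom tl y.2 (q : Int) none = fI := by
        intro y hy hm
        have hqi : q ≤ fI.toNat := by omega
        have hc := cand_of_match hq hqi hm.1 hm.2
        have hy_cand : y ∈ cand := List.mem_filter.mpr ⟨hy, hc⟩
        refine ⟨hy_cand, ?_⟩
        have hle := find_le_of_match hq hqi hm.1 hm.2
        have hge := (hcandF y hy_cand).2.1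
        -- minimality of fI over cand
        have hminf : gapV tl (q:Int) lcs ≤ gapV tl (q:Int) y := by
          rw [hc1] at hy_cand
          rcases List.mem_append.mp hy_cand with hp | hs
          · have hyK : y.1 ∈ preK := by rw [← hpreMap]; exact List.mem_map_of_mem hp
            have := hpreK y.1 hyK
            simp only [lexLt] at this
            rw [← hfst, hgetg lcs hlcs_cand, hgetg y (by rw [hc1]; exact List.mem_append_left _ hp),
              hgetm lcs hlcs_cand, hgetm y (by rw [hc1]; exact List.mem_append_left _ hp)] at this
            omega
          · rcases List.mem_cons.mp hs with rfl | hs'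
            · omega
            · have hyK : y.1 ∈ sufK := by rw [← hsufMap]; exact List.mem_map_of_mem hs'
              have := hsufK y.1 hyK
              simp only [lexLt] at this
              have hmem : y ∈ cand := by
                rw [hc1]; exact List.mem_append_right _ (List.mem_cons_of_mem _ hs')
              rw [← hfst, hgetg lcs hlcs_cand, hgetg y hmem,
                hgetm lcs hlcs_cand, hgetm y hmem] at this
              omega
        unfold gapV at hminf
        omega
      have hlcs_ecs : lcs ∈ ecs := List.mem_of_mem_filter hlcs_cand
      obtain ⟨epre, esuf, hecs⟩ := List.append_of_mem hlcs_ecs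
      have hlcs_not_epre : lcs ∉ epre := by
        intro hmem
        rw [hecs] at hnd
        have : lcs.1 ∈ epre.map Prod.fst := List.mem_map_of_mem hmem
        simp only [List.map_append, List.map_cons] at hnd
        have := (List.nodup_append.mp hnd).2.2
        exact (this lcs.1 ‹lcs.1 ∈ epre.map Prod.fst› lcs.1 List.mem_cons_self) rfl
      have hlcs_not_pre : lcs ∉ pre := by
        intro hmem
        rw [hc1] at hndc
        have : lcs.1 ∈ pre.map Prod.fst := List.mem_map_of_mem hmem
        simp only [List.map_append, List.map_cons] at hndc
        have := (List.nodup_append.mp hndc).2.2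
        exact (this lcs.1 ‹lcs.1 ∈ pre.map Prod.fst› lcs.1 List.mem_cons_self) rfl
      have hfilter : epre.filter (candP tl (q:Int)) ++ lcs :: esuf.filter (candP tl (q:Int)) = pre ++ lcs :: suf := by
        have : cand = epre.filter (candP tl (q:Int)) ++ lcs :: esuf.filter (candP tl (q:Int)) := by
          rw [hcanddef, hecs, List.filter_append, List.filter_cons]
          rw [if_pos (List.of_mem_filter hlcs_cand)]
        rw [← this, hc1]
      obtain ⟨hpre_eq, hsuf_eq⟩ := unique_split _ _ _ _ lcs hfilter
        (fun h => hlcs_not_epre (List.mem_of_mem_filter h)) hlcs_not_pre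
      -- strict bound on earlier matching chunks
      have hpre_strict : ∀ y ∈ epre, matchB tl fI.toNat y → y.2.length < lcs.2.length := by
        intro y hy hm
        have hyecs : y ∈ ecs := by rw [hecs]; exact List.mem_append_left _ hy
        obtain ⟨hy_cand, hfy⟩ := hmatch_mem y hyecs hm
        have hy_pre : y ∈ pre := by
          rw [← hpre_eq]
          exact List.mem_filter.mpr ⟨hy, List.of_mem_filter hy_cand⟩
        have hyK : y.1 ∈ preK := by rw [← hpreMap]; exact List.mem_map_of_mem hy_pre
        have := hpreK y.1 hyK
        simp only [lexLt] at this
        rw [← hfst, hgetg lcs hlcs_cand, hgetg y hy_cand, hgetm lcs hlcs_cand, hgetm y hy_cand] at this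
        unfold gapV at this
        rw [hfy] at this
        omega
      have hsuf_le : ∀ y ∈ esuf, matchB tl fI.toNat y → y.2.length ≤ lcs.2.length := by
        intro y hy hm
        have hyecs : y ∈ ecs := by
          rw [hecs]; exact List.mem_append_right _ (List.mem_cons_of_mem _ hy)
        obtain ⟨hy_cand, hfy⟩ := hmatch_mem y hyecs hm
        have hy_suf : y ∈ suf := by
          rw [← hsuf_eq]
          exact List.mem_filter.mpr ⟨hy, List.of_mem_filter hy_cand⟩
        have hyK : y.1 ∈ sufK := by rw [← hsufMap]; exact List.mem_map_of_mem hy_suf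
        have := hsufK y.1 hyK
        simp only [lexLt] at this
        rw [← hfst, hgetg lcs hlcs_cand, hgetg y hy_cand, hgetm lcs hlcs_cand, hgetm y hy_cand] at this
        unfold gapV at this
        rw [hfy] at this
        omega
      have hmatchlcs : matchB tl fI.toNat lcs := ⟨hlenpos, hprefix⟩
      show (bSel tl ecs fI.toNat) = some (ℓ, lcs.2.length)
      unfold bSel
      rw [hecs, List.foldl_append, List.foldl_cons]
      have hacc := bfold_bound (L := lcs.2.length) epre none hpre_strict (by simp)
      rw [bStep_of_match hmatchlcs _ hacc, hfst]
      exact bfold_keep esuf hsuf_le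

theorem bLoop_succ (tl : List Char) (ecs : List (Int × List Char)) (fuel pos : Nat)
    (out : List (Int × Int)) :
    bLoop tl ecs (fuel + 1) pos out =
      if pos < tl.length then
        (match bSel tl ecs pos with
          | none => bLoop tl ecs fuel (pos + 1) out
          | some r => bLoop tl ecs fuel (pos + r.2) (out ++ [(r.1, (pos : Int))]))
      else out := rfl

theorem greedyLoop_succ (tl : List Char) (ecs : List (Int × List Char)) (fuel : Nat) (p : Int)
    (stack : List (Int × Int)) :
    greedyLoop tl ecs (fuel + 1) p stack =
      (let gm := greedyDicts tl ecs p
       if gm.1.size = 0 then stack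
       else
         match PySem.List.min2? gm.1.keys (fun k => gm.1.getD k 0) (fun k => -(gm.2.getD k 0)) with
         | none => stack
         | some label =>
             greedyLoop tl ecs fuel (p + gm.1.getD label 0 + gm.2.getD label 0)
               (stack ++ [(label, p + gm.1.getD label 0)])) := rfl

theorem bloop_tail (tl : List Char) (ecs : List (Int × List Char)) :
    ∀ (f pos : Nat) (out : List (Int × Int)), tl.length ≤ pos → bLoop tl ecs f pos out = out := by
  intro f
  cases f with
  | zero => intro pos out _; rfl
  | succ f => intro pos out h; rw [bLoop_succ, if_neg (by omega)]

theorem bloop_none (tl : List Char) (ecs : List (Int × List Char)) (q : Nat)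
    (hnone : ∀ pos, q ≤ pos → bSel tl ecs pos = none) :
    ∀ (f pos : Nat) (out : List (Int × Int)), q ≤ pos → bLoop tl ecs f pos out = out := by
  intro f
  induction f with
  | zero => intro pos out _; rfl
  | succ f ih =>
    intro pos out hpos
    by_cases h : pos < tl.length
    · rw [bLoop_succ, if_pos h, hnone pos hpos]
      exact ih (pos + 1) out (by omega)
    · rw [bLoop_succ, if_neg h]

theorem bloop_fuel (tl : List Char) (ecs : List (Int × List Char)) :
    ∀ (f1 f2 pos : Nat) (out : List (Int × Int)),
      tl.length + 1 - pos ≤ f1 → tl.length + 1 - pos ≤ f2 →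
      bLoop tl ecs f1 pos out = bLoop tl ecs f2 pos out := by
  intro f1
  induction f1 with
  | zero =>
    intro f2 pos out h1 _
    rw [bloop_tail tl ecs 0 pos out (by omega), bloop_tail tl ecs f2 pos out (by omega)]
  | succ f ih =>
    intro f2 pos out h1 h2
    by_cases hp : pos < tl.length
    · obtain ⟨f2', rfl⟩ : ∃ f2', f2 = f2' + 1 := ⟨f2 - 1, by omega⟩
      rw [bLoop_succ, bLoop_succ, if_pos hp, if_pos hp]
      cases hsel : bSel tl ecs pos with
      | none => exact ih f2' (pos + 1) out (by omega) (by omega)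
      | some r =>
        have hr : 0 < r.2 := by
          rcases bfold_some ecs none r hsel with h | ⟨lc, _, hreq, hm⟩
          · exact absurd h (by simp)
          · rw [hreq]; exact hm.1
        exact ih f2' (pos + r.2) (out ++ [(r.1, (pos : Int))]) (by omega) (by omega)
    · rw [bloop_tail tl ecs _ pos out (by omega), bloop_tail tl ecs f2 pos out (by omega)]

theorem bcrawl (tl : List Char) (ecs : List (Int × List Char)) {i L : Nat} {ℓ : Int}
    (hiL : i + L ≤ tl.length) (hL : 0 < L)
    (hsel : bSel tl ecs i = some (ℓ, L)) :
    ∀ (d q f : Nat) (out : List (Int × Int)), q + d = i →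
      (∀ j, q ≤ j → j < i → bSel tl ecs j = none) →
      tl.length + 1 - q ≤ f →
      bLoop tl ecs f q out =
        bLoop tl ecs (tl.length + 1 - (i + L)) (i + L) (out ++ [(ℓ, (i : Int))]) := by
  intro d
  induction d with
  | zero =>
    intro q f out hqd hnone hf
    have hqi : q = i := by omega
    subst hqi
    obtain ⟨f', rfl⟩ : ∃ f', f = f' + 1 := ⟨f - 1, by omega⟩
    rw [bLoop_succ, if_pos (by omega), hsel]
    show bLoop tl ecs f' (q + L) (out ++ [(ℓ, (q : Int))]) = _
    exact bloop_fuel tl ecs f' (tl.length + 1 - (q + L)) (q + L) (out ++ [(ℓ, (q : Int))]) (by omega) (by omega)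
  | succ d ih =>
    intro q f out hqd hnone hf
    obtain ⟨f', rfl⟩ : ∃ f', f = f' + 1 := ⟨f - 1, by omega⟩
    rw [bLoop_succ, if_pos (by omega), hnone q (le_refl q) (by omega)]
    show bLoop tl ecs f' (q + 1) out = _
    exact ih (q + 1) f' out (by omega) (fun j hj hji => hnone j (by omega) hji) (by omega)

theorem loop_eq (tl : List Char) (ecs : List (Int × List Char))
    (hnd : (ecs.map Prod.fst).Nodup) :
    ∀ (fa fb q : Nat) (out : List (Int × Int)), q ≤ tl.length →
      tl.length + 1 - q ≤ fa → tl.length + 1 - q ≤ fb →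
      greedyLoop tl ecs fa (q : Int) out = bLoop tl ecs fb q out := by
  intro fa
  induction fa with
  | zero => intro fb q out hq h1 _; omega
  | succ fa ih =>
    intro fb q out hq h1 h2
    rcases astep tl ecs hnd q hq with ⟨hsz, hnone⟩ | ⟨ℓ, i, L, hsz, hmin, hgd, hmd, hqi, hL, hiL, hnone, hsel⟩
    · rw [bloop_none tl ecs q hnone fb q out (le_refl q)]
      rw [greedyLoop_succ]
      simp only [if_pos hsz]
    · rw [greedyLoop_succ]
      simp only [if_neg hsz, hmin]
      show greedyLoop tl ecs fa
          ((q : Int) + (greedyDicts tl ecs (q:Int)).1.getD ℓ 0 + (greedyDicts tl ecs (q:Int)).2.getD ℓ 0)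
          (out ++ [(ℓ, (q : Int) + (greedyDicts tl ecs (q:Int)).1.getD ℓ 0)]) = _
      rw [hgd, hmd]
      have harg1 : (q : Int) + ((i : Int) - (q : Int)) + (L : Int) = ((i + L : Nat) : Int) := by
        push_cast; ring
      have harg2 : (q : Int) + ((i : Int) - (q : Int)) = (i : Int) := by ring
      rw [harg1, harg2]
      rw [ih fa (i + L) (out ++ [(ℓ, (i : Int))]) (by omega) (by omega) (by omega)]
      rw [bcrawl tl ecs hiL hL hsel (i - q) q fb out (by omega) hnone h2]
      exact bloop_fuel tl ecs fa (tl.length + 1 - (i + L)) (i + L) (out ++ [(ℓ, (i : Int))]) (by omega) (by omega)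

-- ===== VERDICT (by name: the statement is the Claim_ definition above) =====
theorem greedy_label_spec : Claim_equal_greedy_label := by
  intro text chunks _
  show greedy_label text chunks = greedy_label_alt text chunks
  unfold greedy_label greedy_label_alt
  have hnd : ((PySem.List.enumerate (chunks.map String.toList)).map Prod.fst).Nodup := by
    have hpw := PySem.List.pairwise_lt_enumerate (xs := chunks.map String.toList) (s := 0)
    exact ((hpw.map Prod.fst (fun a b hab => hab)).imp (fun h => ne_of_lt h))
  have := loop_eq text.toList (PySem.List.enumerate (chunks.map String.toList)) hnd
    (text.toList.length + 1) (text.toList.length + 1) 0 [] (by omega) (by omega) (by omega)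
  simpa using this
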